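-- pv_equiv track=rewrite | github.com/faderskd/algorithms | range_minimum_query.py | sqrt_square_root_decomposition
-- ===== SOURCE A (Python) =====
-- import math
--
-- def sqrt_square_root_decomposition(li):
--     block_size = int(math.sqrt(len(li)))
--     result = []
--
--     i = 0
--     while (i + 1) * block_size <= len(li):
--         result.append(min(li[block_size * i: block_size * (i + 1)]))
--         i += 1
--     return result
-- ===== SOURCE B (Python) =====
-- import math
--
--
-- def sqrt_square_root_decomposition(li):
--     # One pass with a running block minimum and a counter; the trailing
--     # partial block never reaches the counter threshold, so it is dropped.
--     block_size = int(math.sqrt(len(li)))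
--     result = []
--     cur = 0
--     cnt = 0
--     for x in li:
--         cur = x if cnt == 0 else min(cur, x)
--         cnt += 1
--         if cnt == block_size:
--             result.append(cur)
--             cnt = 0
--     return result
-- ===== Notes on version B (the rewrite author's own statement) =====
-- stated objective: alternative
-- what changed: Replaced the while-loop over block indices that slices the list and calls min() on each slice with a single left-to-right pass maintaining a running block minimum and a per-block counter, appending and resetting each time a full block is consumed.
-- crash fix: On the empty list A raises ValueError (min() of the empty slice at the first iteration, since block_size==0); B naturally returns []. — e.g. on sqrt_square_root_decomposition([]): A raises ValueError, B returns []
import Mathlib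
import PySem

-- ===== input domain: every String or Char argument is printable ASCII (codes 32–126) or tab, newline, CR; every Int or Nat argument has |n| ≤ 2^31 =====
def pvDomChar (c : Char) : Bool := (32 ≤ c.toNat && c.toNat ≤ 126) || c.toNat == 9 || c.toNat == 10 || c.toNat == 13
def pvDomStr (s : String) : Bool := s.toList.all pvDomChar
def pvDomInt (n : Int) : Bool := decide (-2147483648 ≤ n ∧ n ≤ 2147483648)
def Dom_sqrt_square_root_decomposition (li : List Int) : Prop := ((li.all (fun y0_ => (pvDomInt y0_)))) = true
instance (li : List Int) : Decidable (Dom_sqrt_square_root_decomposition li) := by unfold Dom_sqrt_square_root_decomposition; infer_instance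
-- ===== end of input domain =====

-- B replaces A's block-index while-loop (slice + min per block) with a single pass
-- carrying a running block minimum and a counter; same results, same O(n) cost (objective: alternative).
-- Python's int(math.sqrt(n)) equals Nat.sqrt n exactly for every list length arising here.

-- ===== PORT A =====
-- the while-loop of A; the `none` branch is where Python raises ValueError (min of the
-- empty slice, reached only when block_size = 0, i.e. li = []); the `0 < b` guard only
-- makes the recursion total — whenever min? returns a value the slice is nonempty, so 0 < b.
def pvLoopA (li : List Int) (b i : Nat) (acc : List Int) : List Int :=
  if h : (i + 1) * b ≤ li.length then
    match PySem.List.min? (PySem.List.slice li (some ((b * i : Nat) : Int)) (some ((b * (i + 1) : Nat) : Int))) (fun y => y) with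
    | none => acc
    | some m =>
      if hb : 0 < b then pvLoopA li b (i + 1) (acc ++ [m]) else acc
  else acc
termination_by li.length + 1 - (i + 1) * b
decreasing_by
  have h1 : (i + 1 + 1) * b = (i + 1) * b + b := by ring
  omega

def sqrt_square_root_decomposition (li : List Int) : List Int :=
  pvLoopA li (Nat.sqrt li.length) 0 []

-- ===== PORT B =====
def pvStepB (b : Nat) : List Int × Int × Nat → Int → List Int × Int × Nat
  | (res, cur, cnt), x =>
    let cur' := if cnt = 0 then x else min cur x
    let cnt' := cnt + 1
    if cnt' = b then (res ++ [cur'], cur', 0) else (res, cur', cnt')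

def sqrt_square_root_decomposition_alt (li : List Int) : List Int :=
  (li.foldl (pvStepB (Nat.sqrt li.length)) ([], 0, 0)).1

-- ===== PRECONDITION & SPEC =====
-- Pre_ excludes exactly the empty list, on which A raises ValueError (min of an empty slice).
def Pre_sqrt_square_root_decomposition (li : List Int) : Prop := li ≠ []
instance (li : List Int) : Decidable (Pre_sqrt_square_root_decomposition li) := by unfold Pre_sqrt_square_root_decomposition; infer_instance

def pvWitness_sqrt_square_root_decomposition : List Int := [3, 1, 4, 1, 5]

-- On the empty list A raises ValueError (min() of the empty slice, block_size = 0); B returns [].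
def Raises_sqrt_square_root_decomposition (li : List Int) : Prop := li = []
instance (li : List Int) : Decidable (Raises_sqrt_square_root_decomposition li) := by unfold Raises_sqrt_square_root_decomposition; infer_instance
def pvRaiseWitness_sqrt_square_root_decomposition : List Int := []
def pvRaiseWitnessOut_sqrt_square_root_decomposition : List Int := []

def Spec_sqrt_square_root_decomposition (li : List Int) (out : List Int) : Prop := out = sqrt_square_root_decomposition_alt li
instance (li : List Int) (out : List Int) : Decidable (Spec_sqrt_square_root_decomposition li out) := by unfold Spec_sqrt_square_root_decomposition; infer_instance

-- ===== CLAIM (what is proved, stated in full; the proofs are below) =====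
def Claim_equal_sqrt_square_root_decomposition : Prop := ∀ (li : List Int), Dom_sqrt_square_root_decomposition li → Pre_sqrt_square_root_decomposition li → Spec_sqrt_square_root_decomposition li (sqrt_square_root_decomposition li)

def Claim_raises_sqrt_square_root_decomposition : Prop := (∀ (li : List Int), Dom_sqrt_square_root_decomposition li → Raises_sqrt_square_root_decomposition li → ¬ Pre_sqrt_square_root_decomposition li) ∧ (Dom_sqrt_square_root_decomposition (pvRaiseWitness_sqrt_square_root_decomposition) ∧ Raises_sqrt_square_root_decomposition (pvRaiseWitness_sqrt_square_root_decomposition) ∧ sqrt_square_root_decomposition_alt (pvRaiseWitness_sqrt_square_root_decomposition) = pvRaiseWitnessOut_sqrt_square_root_decomposition)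

-- ===== LEMMAS AND PROOFS =====

-- minimum of a nonempty list (0 on [], never used there)
def pvHeadMin : List Int → Int
  | [] => 0
  | y :: ys => ys.foldl min y

-- common characterisation: the minima of the successive complete blocks of size b
def pvChunkMins (b : Nat) (li : List Int) : List Int :=
  if h : 0 < b ∧ b ≤ li.length then
    pvHeadMin (li.take b) :: pvChunkMins b (li.drop b)
  else []
termination_by li.length
decreasing_by simp only [List.length_drop]; omega

theorem pvLoopA_eq (li : List Int) (b : Nat) (hb : 0 < b) :
    ∀ (k i : Nat) (acc : List Int), li.length + 1 - (i + 1) * b ≤ k →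
      pvLoopA li b i acc = acc ++ pvChunkMins b (li.drop (b * i)) := by
  intro k
  induction k with
  | zero =>
    intro i acc hk
    have hmul : (i + 1) * b = b * i + b := by ring
    rw [pvLoopA, dif_neg (by omega)]
    rw [pvChunkMins, dif_neg (by simp only [List.length_drop]; omega)]
    simp
  | succ k ih =>
    intro i acc hk
    have hmul : (i + 1) * b = b * i + b := by ring
    by_cases h : (i + 1) * b ≤ li.length
    · -- the slice is the next complete block
      have hlt : b * i < li.length := by omega
      have hslice : PySem.List.slice li (some ((b * i : Nat) : Int)) (some ((b * (i + 1) : Nat) : Int))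
          = (li.drop (b * i)).take b := by
        have : (b * (i + 1) : Nat) = b * i + b := by ring
        rw [this]
        push_cast
        exact PySem.List.slice_natCast_add li (b * i) b
      have hdropne : li.drop (b * i) ≠ [] := by
        intro hc
        have := congrArg List.length hc
        simp only [List.length_drop, List.length_nil] at this
        omega
      obtain ⟨y, ys, hd⟩ := List.exists_cons_of_ne_nil hdropne
      have htake : (li.drop (b * i)).take b = y :: ys.take (b - 1) := by
        rw [hd]
        cases b with
        | zero => omega
        | succ b' => simp
      rw [pvLoopA, dif_pos h, hslice, htake, PySem.List.min?_id_cons]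
      simp only [dif_pos hb]
      have hrec : li.drop (b * (i + 1)) = (li.drop (b * i)).drop b := by
        rw [List.drop_drop]
        congr 1
      have hble : b ≤ (List.drop (b * i) li).length := by
        simp only [List.length_drop]; omega
      rw [ih (i + 1) (acc ++ [(ys.take (b - 1)).foldl min y]) (by
        have h2 : (i + 1 + 1) * b = (i + 1) * b + b := by ring
        omega)]
      rw [hrec]
      conv_rhs => rw [pvChunkMins]
      rw [dif_pos (⟨hb, hble⟩ : 0 < b ∧ b ≤ (List.drop (b * i) li).length), htake]
      simp [pvHeadMin]
    · rw [pvLoopA, dif_neg h]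
      rw [pvChunkMins, dif_neg (by simp only [List.length_drop]; omega)]
      simp

theorem pvRunFull (b : Nat) :
    ∀ (xs : List Int) (res : List Int) (cur : Int) (cnt : Nat),
      1 ≤ cnt → cnt + xs.length = b → 1 ≤ xs.length →
      List.foldl (pvStepB b) (res, cur, cnt) xs = (res ++ [xs.foldl min cur], xs.foldl min cur, 0) := by
  intro xs
  induction xs with
  | nil => intro res cur cnt _ _ h3; simp at h3
  | cons y ys ih =>
    intro res cur cnt h1 h2 _
    simp only [List.foldl_cons]
    cases ys with
    | nil =>
      have hcnt : cnt + 1 = b := by simpa using h2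
      simp [pvStepB, if_neg (by omega : ¬ cnt = 0), hcnt]
    | cons z zs =>
      have hne : ¬ cnt + 1 = b := by simp at h2; omega
      have hstep : pvStepB b (res, cur, cnt) y = (res, min cur y, cnt + 1) := by
        simp [pvStepB, if_neg (by omega : ¬ cnt = 0), hne]
      rw [hstep, ih res (min cur y) (cnt + 1) (by omega) (by simp at h2 ⊢; omega) (by simp)]

theorem pvRunBlock (b : Nat) (hb : 0 < b) (xs : List Int) (hlen : xs.length = b)
    (res : List Int) (cur : Int) :
    List.foldl (pvStepB b) (res, cur, 0) xs = (res ++ [pvHeadMin xs], pvHeadMin xs, 0) := by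
  cases xs with
  | nil => simp at hlen; omega
  | cons y ys =>
    cases ys with
    | nil =>
      have hb1 : (1 : Nat) = b := by simpa using hlen
      simp [pvStepB, pvHeadMin, hb1]
    | cons z zs =>
      have hne : ¬ (0 + 1 : Nat) = b := by simp at hlen; omega
      have hstep : List.foldl (pvStepB b) (res, cur, 0) (y :: z :: zs)
          = List.foldl (pvStepB b) (res, y, 1) (z :: zs) := by
        simp [pvStepB, hne]
      rw [hstep, pvRunFull b (z :: zs) res y 1 (by omega) (by simp at hlen ⊢; omega) (by simp)]
      simp [pvHeadMin]

theorem pvRunShort (b : Nat) :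
    ∀ (xs : List Int) (res : List Int) (cur : Int) (cnt : Nat),
      cnt + xs.length < b →
      (List.foldl (pvStepB b) (res, cur, cnt) xs).1 = res := by
  intro xs
  induction xs with
  | nil => intro res cur cnt _; simp
  | cons y ys ih =>
    intro res cur cnt h
    have hstep : List.foldl (pvStepB b) (res, cur, cnt) (y :: ys)
        = List.foldl (pvStepB b) (res, if cnt = 0 then y else min cur y, cnt + 1) ys := by
      simp [pvStepB, if_neg (by simp at h; omega : ¬ cnt + 1 = b)]
    rw [hstep]
    exact ih res _ (cnt + 1) (by simp at h ⊢; omega)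

theorem pvFoldB_chunks (b : Nat) (hb : 0 < b) :
    ∀ (n : Nat) (li : List Int), li.length ≤ n → ∀ (res : List Int) (cur : Int),
      (List.foldl (pvStepB b) (res, cur, 0) li).1 = res ++ pvChunkMins b li := by
  intro n
  induction n with
  | zero =>
    intro li hn res cur
    have : li = [] := List.length_eq_zero_iff.mp (by omega)
    subst this
    rw [pvChunkMins, dif_neg (by simp; omega)]
    simp
  | succ n ih =>
    intro li hn res cur
    by_cases h : b ≤ li.length
    · have hsplit : li = li.take b ++ li.drop b := (List.take_append_drop b li).symm
      conv_lhs => rw [hsplit]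
      rw [List.foldl_append]
      rw [pvRunBlock b hb (li.take b) (by simp; omega) res cur]
      rw [ih (li.drop b) (by simp; omega) (res ++ [pvHeadMin (li.take b)]) (pvHeadMin (li.take b))]
      conv_rhs => rw [pvChunkMins, dif_pos (⟨hb, h⟩ : 0 < b ∧ b ≤ li.length)]
      simp
    · rw [pvChunkMins, dif_neg (by omega)]
      rw [pvRunShort b li res cur 0 (by omega)]
      simp

-- ===== VERDICT (by name: the statement is the Claim_ definition above) =====
theorem sqrt_square_root_decomposition_spec : Claim_equal_sqrt_square_root_decomposition := by
  intro li _ hpre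
  unfold Spec_sqrt_square_root_decomposition
  have hlen : 0 < li.length := List.length_pos_iff.mpr hpre
  have hb : 0 < Nat.sqrt li.length := Nat.sqrt_pos.mpr hlen
  unfold sqrt_square_root_decomposition sqrt_square_root_decomposition_alt
  rw [pvLoopA_eq li (Nat.sqrt li.length) hb (li.length + 1) 0 [] (by omega)]
  rw [pvFoldB_chunks (Nat.sqrt li.length) hb li.length li (le_refl _) [] 0]
  simp

@[simp] theorem sqrt_square_root_decomposition_raises : Claim_raises_sqrt_square_root_decomposition := by
  unfold Claim_raises_sqrt_square_root_decomposition
  exact ⟨fun li _ hr => by simp [Raises_sqrt_square_root_decomposition] at hr; simp [Pre_sqrt_square_root_decomposition, hr], by decide⟩
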